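-- pv_equiv track=rewrite | github.com/SashaFedosov/MolD | Legacy-versions/MolD_v1.3_for_Python3.py | PositionArrays
-- ===== SOURCE A (Python) =====
-- def PositionArrays(Motifs):#VERYNEW ALL FUNCTION NEW
--     PositionArrays = []
--     VarPosList = []
--     for i in range(len(Motifs[0])):
--         Const = True
--         array = [Motifs[0][i]]
--         for j in range(len(Motifs[1:])):
--             if Motifs[j][i] != 'N':
--                 if Motifs[j][i] != array[-1]:
--                     Const = False
--                 array.append(Motifs[j][i])
--         PositionArrays.append(array)
--         if Const == False:
--             VarPosList.append(i)
--     return PositionArrays, VarPosList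
-- ===== SOURCE B (Python) =====
-- def PositionArrays(Motifs):
--     arrays = []
--     for i in range(len(Motifs[0])):
--         array = [Motifs[0][i]]
--         for j in range(len(Motifs) - 1):
--             if Motifs[j][i] != 'N':
--                 array.append(Motifs[j][i])
--         arrays.append(array)
--     VarPosList = [i for i, arr in enumerate(arrays) if len(set(arr)) > 1]
--     return arrays, VarPosList
-- ===== Notes on version B (the rewrite author's own statement) =====
-- stated objective: simpler
-- what changed: Replaces the inline Const flag and array[-1] comparison threaded through the building loop by a second, separately shaped pass that lists the variable columns with a set-cardinality check over the finished per-column arrays (list comprehension over enumerate).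
import Mathlib
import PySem

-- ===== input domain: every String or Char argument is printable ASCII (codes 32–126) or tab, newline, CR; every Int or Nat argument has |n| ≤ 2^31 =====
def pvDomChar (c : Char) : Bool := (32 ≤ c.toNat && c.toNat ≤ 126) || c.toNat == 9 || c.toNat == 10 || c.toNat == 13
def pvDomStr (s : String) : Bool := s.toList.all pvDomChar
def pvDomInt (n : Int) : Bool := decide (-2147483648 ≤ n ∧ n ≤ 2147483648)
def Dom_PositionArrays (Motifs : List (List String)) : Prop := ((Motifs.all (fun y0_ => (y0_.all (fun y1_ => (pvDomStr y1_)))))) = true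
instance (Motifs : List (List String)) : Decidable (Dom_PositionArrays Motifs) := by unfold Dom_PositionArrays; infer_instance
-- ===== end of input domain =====

-- B is a simpler decomposition of A: the per-column arrays are built by the same nested traversal,
-- but the variable columns are listed in a second pass by a set-cardinality check over the finished
-- arrays, replacing A's inline Const flag and array[-1] comparison (no speed claim).

-- ===== PORT A =====
def PositionArrays (Motifs : List (List String)) : List (List String) × List Int :=
  (List.range ((PySem.List.pyGetD Motifs 0 []).length)).foldl
    (fun st (i : Nat) =>
      let inner := (List.range ((PySem.List.slice Motifs (some 1) none).length)).foldl
        (fun (p : Bool × List String) (j : Nat) =>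
          if PySem.List.pyGetD (PySem.List.pyGetD Motifs (j : Int) []) (i : Int) "" ≠ "N" then
            ((if PySem.List.pyGetD (PySem.List.pyGetD Motifs (j : Int) []) (i : Int) ""
                  ≠ PySem.List.pyGetD p.2 (-1) "" then false else p.1),
             p.2 ++ [PySem.List.pyGetD (PySem.List.pyGetD Motifs (j : Int) []) (i : Int) ""])
          else p)
        (true, [PySem.List.pyGetD (PySem.List.pyGetD Motifs 0 []) (i : Int) ""])
      (st.1 ++ [inner.2], if inner.1 = false then st.2 ++ [(i : Int)] else st.2))
    ([], [])

-- ===== PORT B =====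
def PositionArrays_alt (Motifs : List (List String)) : List (List String) × List Int :=
  let arrays := (List.range ((PySem.List.pyGetD Motifs 0 []).length)).map
    (fun (i : Nat) =>
      (List.range (Motifs.length - 1)).foldl
        (fun arr (j : Nat) =>
          if PySem.List.pyGetD (PySem.List.pyGetD Motifs (j : Int) []) (i : Int) "" ≠ "N" then
            arr ++ [PySem.List.pyGetD (PySem.List.pyGetD Motifs (j : Int) []) (i : Int) ""]
          else arr)
        [PySem.List.pyGetD (PySem.List.pyGetD Motifs 0 []) (i : Int) ""])
  let varPosList := ((PySem.List.enumerate arrays).filter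
      (fun p => 1 < (PySem.Set.ofList p.2).length)).map (fun p => p.1)
  (arrays, varPosList)

-- ===== PRECONDITION & SPEC =====
-- Pre_ excludes exactly the inputs on which the Python A raises (IndexError): an empty Motifs list,
-- or a row among Motifs[0..len-2] shorter than Motifs[0] (those rows are indexed at every column of row 0).
def Pre_PositionArrays (Motifs : List (List String)) : Prop :=
  Motifs ≠ [] ∧ ∀ r ∈ Motifs.dropLast, (Motifs.headD []).length ≤ r.length
instance (Motifs : List (List String)) : Decidable (Pre_PositionArrays Motifs) := by
  unfold Pre_PositionArrays; infer_instance
def pvWitness_PositionArrays : List (List String) := [["A", "C"], ["A", "G"]]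

def Spec_PositionArrays (Motifs : List (List String)) (out : List (List String) × List Int) : Prop := out = PositionArrays_alt Motifs
instance (Motifs : List (List String)) (out : List (List String) × List Int) : Decidable (Spec_PositionArrays Motifs out) := by unfold Spec_PositionArrays; infer_instance

-- ===== CLAIM (what is proved, stated in full; the proofs are below) =====
def Claim_equal_PositionArrays : Prop := ∀ (Motifs : List (List String)), Dom_PositionArrays Motifs → Pre_PositionArrays Motifs → Spec_PositionArrays Motifs (PositionArrays Motifs)

-- ===== LEMMAS AND PROOFS =====

-- proof-side names for the cell reads and the two per-column results
def pvCell (Motifs : List (List String)) (i j : Nat) : String :=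
  PySem.List.pyGetD (PySem.List.pyGetD Motifs (j : Int) []) (i : Int) ""
def pvHead (Motifs : List (List String)) (i : Nat) : String :=
  PySem.List.pyGetD (PySem.List.pyGetD Motifs 0 []) (i : Int) ""
def pvArr (Motifs : List (List String)) (i : Nat) : List String :=
  [pvHead Motifs i] ++ (((List.range (Motifs.length - 1)).filter
      (fun j => pvCell Motifs i j ≠ "N")).map (pvCell Motifs i))
def pvConst (Motifs : List (List String)) (i : Nat) : Bool :=
  ((List.range (Motifs.length - 1)).filter (fun j => pvCell Motifs i j ≠ "N")).all
    (fun j => pvCell Motifs i j == pvHead Motifs i)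
def pvStepA (c : Nat → String) (p : Bool × List String) (j : Nat) : Bool × List String :=
  if c j ≠ "N" then
    ((if c j ≠ PySem.List.pyGetD p.2 (-1) "" then false else p.1), p.2 ++ [c j])
  else p

-- two distinct members force length > 1
lemma pv_one_lt_length {α : Type} {l : List α} {a b : α} (ha : a ∈ l) (hb : b ∈ l)
    (hne : a ≠ b) : 1 < l.length := by
  match l with
  | [] => simp at ha
  | [z] =>
      simp at ha hb
      exact absurd (ha.trans hb.symm) hne
  | z :: w :: t => simp

-- adding elements already present leaves a PySem.Set unchanged
lemma pv_foldl_add_of_mem {α : Type} [BEq α] [LawfulBEq α] :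
    ∀ (s : List α) (t : PySem.Set α), (∀ y ∈ s, y ∈ t) → s.foldl PySem.Set.add t = t := by
  intro s
  induction s with
  | nil => intro t _; rfl
  | cons y s ih =>
      intro t h
      have hy : y ∈ t := h y (by simp)
      have hadd : PySem.Set.add t y = t := by
        simp [PySem.Set.add, PySem.Set.contains, hy]
      rw [List.foldl_cons, hadd]
      exact ih t (fun z hz => h z (by simp [hz]))

-- the set of (x :: s) has more than one element iff s has a member different from x
lemma pv_set_var (x : String) (s : List String) :
    (1 < (PySem.Set.ofList (x :: s)).length) ↔ ¬ (s.all (fun y => y == x) = true) := by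
  constructor
  · intro hlen hall
    have hfix : ∀ y ∈ s, y = x := fun y hy => by
      simpa using List.all_eq_true.mp hall y hy
    have h1 : PySem.Set.ofList (x :: s) = [x] := by
      have hstep : s.foldl PySem.Set.add [x] = [x] :=
        pv_foldl_add_of_mem s [x] (fun y hy => by simp [hfix y hy])
      have h0 : PySem.Set.ofList (x :: s) = s.foldl PySem.Set.add (PySem.Set.add [] x) := rfl
      have h2 : PySem.Set.add ([] : PySem.Set String) x = [x] := by
        simp [PySem.Set.add, PySem.Set.contains]
      rw [h0, h2, hstep]
    rw [h1] at hlen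
    simp at hlen
  · intro hall
    have hfalse : s.all (fun y => y == x) = false := by
      cases hb : s.all (fun y => y == x)
      · rfl
      · exact absurd hb hall
    obtain ⟨y, hy, hyx⟩ := List.all_eq_false.mp hfalse
    exact pv_one_lt_length ((PySem.Set.mem_ofList _ _).mpr (List.mem_cons_of_mem _ hy))
      ((PySem.Set.mem_ofList _ _).mpr List.mem_cons_self) (by simpa using hyx)

-- inner loop of A: the Const flag is "all kept cells equal the last of l"; the array collects kept cells
lemma pv_innerFold (c : Nat → String) (js : List Nat) :
    ∀ (b : Bool) (l : List String) (hl : l ≠ []),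
      js.foldl (pvStepA c) (b, l)
      = (b && (js.filter (fun j => c j ≠ "N")).all (fun j => c j == l.getLast hl),
         l ++ ((js.filter (fun j => c j ≠ "N")).map c)) := by
  induction js with
  | nil => intro b l hl; simp
  | cons j js ih =>
      intro b l hl
      rw [List.foldl_cons]
      by_cases hc : c j = "N"
      · rw [show pvStepA c (b, l) j = (b, l) from by simp [pvStepA, hc]]
        rw [ih b l hl]
        simp [hc]
      · rw [show pvStepA c (b, l) j = ((b && (c j == l.getLast hl)), l ++ [c j]) from by
            simp only [pvStepA, PySem.List.pyGetD_neg_one l "" hl]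
            rw [if_pos (show c j ≠ "N" from hc)]
            by_cases he : c j = l.getLast hl <;> simp [he]]
        rw [ih (b && (c j == l.getLast hl)) (l ++ [c j]) (by simp)]
        rw [List.getLast_concat]
        rw [List.filter_cons_of_pos (by simp [hc]), List.all_cons, List.map_cons]
        refine Prod.ext ?_ ?_
        · by_cases he : c j = l.getLast hl
          · rw [he]
            simp
          · have hbeq : (c j == l.getLast hl) = false := by simp [he]
            simp [hbeq]
        · simp

lemma pv_innerFold_spec (Motifs : List (List String)) (i : Nat) :
    (List.range (Motifs.length - 1)).foldl (pvStepA (pvCell Motifs i))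
      (true, [pvHead Motifs i])
    = (pvConst Motifs i, pvArr Motifs i) := by
  rw [pv_innerFold (pvCell Motifs i) (List.range (Motifs.length - 1)) true
      [pvHead Motifs i] (by simp)]
  simp [pvConst, pvArr, List.getLast_singleton]

-- B's inner loop in the same normal form
lemma pv_foldB_spec (Motifs : List (List String)) (i : Nat) :
    (List.range (Motifs.length - 1)).foldl
      (fun arr j => if pvCell Motifs i j ≠ "N" then arr ++ [pvCell Motifs i j] else arr)
      [pvHead Motifs i] = pvArr Motifs i := by
  have haux : ∀ (js : List Nat) (acc : List String),
      js.foldl (fun arr j => if pvCell Motifs i j ≠ "N" then arr ++ [pvCell Motifs i j] else arr) acc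
      = acc ++ (js.filter (fun j => pvCell Motifs i j ≠ "N")).map (pvCell Motifs i) := by
    intro js
    induction js with
    | nil => intro acc; simp
    | cons j js ih =>
        intro acc
        simp only [List.foldl_cons]
        by_cases hc : pvCell Motifs i j = "N"
        · rw [if_neg (by simp [hc])]
          rw [ih acc]
          simp [hc]
        · rw [if_pos (show pvCell Motifs i j ≠ "N" from hc)]
          rw [ih (acc ++ [pvCell Motifs i j])]
          rw [List.filter_cons_of_pos (by simp [hc]), List.map_cons]
          simp [List.append_assoc]
  exact haux (List.range (Motifs.length - 1)) [pvHead Motifs i]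

-- outer loop of A: append-to-both-components fold over a range is a map and a filter
lemma pv_outerFold (f : Nat → Bool × List String) :
    ∀ (n : Nat) (as : List (List String)) (vs : List Int),
      (List.range n).foldl
        (fun st (i : Nat) => (st.1 ++ [(f i).2], if (f i).1 = false then st.2 ++ [(i : Int)] else st.2))
        (as, vs)
      = (as ++ (List.range n).map (fun (i : Nat) => (f i).2),
         vs ++ ((List.range n).filter (fun (i : Nat) => (f i).1 == false)).map (fun (i : Nat) => (i : Int))) := by
  intro n
  induction n with
  | zero => intro as vs; simp
  | succ n ih =>
      intro as vs
      rw [List.range_succ, List.foldl_append, ih as vs]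
      cases hfn : (f n).1 <;>
        simp [hfn, List.filter_append, List.map_append, List.append_assoc]

-- enumerate of a map over a range pairs each index with its image
lemma pv_enum_map_range {α : Type} :
    ∀ (n : Nat) (g : Nat → α) (s : Int),
      PySem.List.enumerate ((List.range n).map g) s
        = (List.range n).map (fun (k : Nat) => (s + (k : Int), g k)) := by
  intro n
  induction n with
  | zero => intro g s; rfl
  | succ n ih =>
      intro g s
      rw [List.range_succ_eq_map, List.map_cons, PySem.List.enumerate_cons, List.map_map,
        ih (g ∘ Nat.succ) (s + 1), List.map_cons, List.map_map]
      refine congrArg₂ List.cons (by simp) ?_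
      refine List.map_congr_left (fun k _ => ?_)
      simp only [Function.comp_apply, Prod.mk.injEq]
      refine ⟨by push_cast; ring, trivial⟩

-- the Const flag is false exactly when the finished array has more than one distinct value
lemma pv_flag (Motifs : List (List String)) (i : Nat) :
    (pvConst Motifs i == false)
      = decide (1 < (PySem.Set.ofList (pvArr Motifs i)).length) := by
  have harr : pvArr Motifs i
      = pvHead Motifs i :: (((List.range (Motifs.length - 1)).filter
          (fun j => pvCell Motifs i j ≠ "N")).map (pvCell Motifs i)) := rfl
  have h := pv_set_var (pvHead Motifs i)
    (((List.range (Motifs.length - 1)).filter (fun j => pvCell Motifs i j ≠ "N")).map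
      (pvCell Motifs i))
  have hconst : pvConst Motifs i
      = (((List.range (Motifs.length - 1)).filter (fun j => pvCell Motifs i j ≠ "N")).map
          (pvCell Motifs i)).all (fun y => y == pvHead Motifs i) := by
    simp [pvConst, List.all_map, Function.comp]
  by_cases hlen : 1 < (PySem.Set.ofList (pvArr Motifs i)).length
  · have hna : ¬ ((((List.range (Motifs.length - 1)).filter
        (fun j => pvCell Motifs i j ≠ "N")).map (pvCell Motifs i)).all
          (fun y => y == pvHead Motifs i) = true) := h.mp (by rwa [harr] at hlen)
    have hfalse : pvConst Motifs i = false := by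
      rw [hconst]
      exact Bool.eq_false_iff.mpr hna
    simp [hfalse, hlen]
  · have hall : (((List.range (Motifs.length - 1)).filter
        (fun j => pvCell Motifs i j ≠ "N")).map (pvCell Motifs i)).all
          (fun y => y == pvHead Motifs i) = true := by
      by_contra hna
      exact hlen (harr ▸ h.mpr hna)
    have htrue : pvConst Motifs i = true := by rw [hconst]; exact hall
    simp [htrue, hlen]

-- the two ports agree on every input
lemma pv_AB (Motifs : List (List String)) :
    PositionArrays Motifs = PositionArrays_alt Motifs := by
  have hm : (PySem.List.slice Motifs (some 1) none).length = Motifs.length - 1 := by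
    rw [PySem.List.slice_from_one]
    exact List.length_tail
  have hA : PositionArrays Motifs
      = ((List.range ((PySem.List.pyGetD Motifs 0 []).length)).map (pvArr Motifs),
         ((List.range ((PySem.List.pyGetD Motifs 0 []).length)).filter
            (fun (i : Nat) => pvConst Motifs i == false)).map (fun (i : Nat) => (i : Int))) := by
    unfold PositionArrays
    rw [hm]
    refine (pv_outerFold (fun (i : Nat) =>
        (List.range (Motifs.length - 1)).foldl (pvStepA (pvCell Motifs i))
          (true, [pvHead Motifs i]))
      ((PySem.List.pyGetD Motifs 0 []).length) [] []).trans ?_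
    refine Prod.ext ?_ ?_
    · simp only [List.nil_append]
      exact List.map_congr_left (fun i _ => congrArg Prod.snd (pv_innerFold_spec Motifs i))
    · simp only [List.nil_append]
      refine congrArg (List.map _) (List.filter_congr (fun i _ => ?_))
      exact congrArg (fun b => b == false) (congrArg Prod.fst (pv_innerFold_spec Motifs i))
  have harr : (List.range ((PySem.List.pyGetD Motifs 0 []).length)).map
      (fun (i : Nat) =>
        (List.range (Motifs.length - 1)).foldl
          (fun arr (j : Nat) =>
            if PySem.List.pyGetD (PySem.List.pyGetD Motifs (j : Int) []) (i : Int) "" ≠ "N" then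
              arr ++ [PySem.List.pyGetD (PySem.List.pyGetD Motifs (j : Int) []) (i : Int) ""]
            else arr)
          [PySem.List.pyGetD (PySem.List.pyGetD Motifs 0 []) (i : Int) ""])
      = (List.range ((PySem.List.pyGetD Motifs 0 []).length)).map (pvArr Motifs) :=
    List.map_congr_left (fun i _ => pv_foldB_spec Motifs i)
  rw [hA]
  dsimp only [PositionArrays_alt]
  rw [harr, pv_enum_map_range ((PySem.List.pyGetD Motifs 0 []).length) (pvArr Motifs) 0]
  refine Prod.ext rfl ?_
  rw [List.filter_map, List.map_map]
  rw [List.filter_congr (fun (i : Nat) (_ : i ∈ List.range ((PySem.List.pyGetD Motifs 0 []).length)) =>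
    (by simpa [Function.comp] using pv_flag Motifs i :
      (pvConst Motifs i == false)
        = ((fun p => decide (1 < (PySem.Set.ofList p.2).length)) ∘
            (fun (k : Nat) => ((0 : Int) + (k : Int), pvArr Motifs k))) i))]
  exact List.map_congr_left (fun k _ => by simp [Function.comp])

-- ===== VERDICT (by name: the statement is the Claim_ definition above) =====
theorem PositionArrays_spec : Claim_equal_PositionArrays := by
  intro Motifs _ _
  unfold Spec_PositionArrays
  exact pv_AB Motifs
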